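-- pv_equiv track=rewrite | github.com/Wonz5130/LeetCode-Solutions | solutions/LCP08-ju-qing-hong-fa-shi-jian/08.py | getTriggerTime
-- ===== SOURCE A (Python) =====
-- from typing import List
--
-- def getTriggerTime(increase: List[List[int]], requirements: List[List[int]]) -> List[int]:
--     n = len(requirements)
--     res = [-1 for x in range(n)]
--
--     # 累加 increase
--     increase = [[0, 0, 0]] + increase
--     for i in range(len(increase) - 1):
--         for j in range(3):
--             increase[i + 1][j] += increase[i][j]
--
--     # 二分
--     for i in range(len(requirements)):
--         left, right = 0, len(increase) - 1
--         while left <= right:  # 注意条件：<=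
--             mid = (left + right) // 2
--             if increase[mid][0] >= requirements[i][0] and increase[mid][1] >= requirements[i][1] and increase[mid][2] >= requirements[i][2]:
--                 res[i] = mid
--                 right = mid - 1
--             else:
--                 left = mid + 1
--
--     return res
-- ===== SOURCE B (Python) =====
-- from typing import List
--
-- def getTriggerTime(increase: List[List[int]], requirements: List[List[int]]) -> List[int]:
--     # cumulative rows as immutable triples (A instead mutates increase's inner lists in place;
--     # this B does not mutate its arguments — return value is identical)
--     days = [(0, 0, 0)]
--     for row in increase:
--         a, b, c = days[-1]
--         days.append((a + row[0], b + row[1], c + row[2]))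
--
--     def search(l: int, r: int, req: List[int]) -> int:
--         # recursive leftmost-probe binary search, same probe sequence as a
--         # (left, right, res) while-loop
--         if l > r:
--             return -1
--         m = (l + r) // 2
--         t = days[m]
--         if t[0] >= req[0] and t[1] >= req[1] and t[2] >= req[2]:
--             s = search(l, m - 1, req)
--             return m if s == -1 else s
--         return search(m + 1, r, req)
--
--     return [search(0, len(days) - 1, req) for req in requirements]
-- ===== Notes on version B (the rewrite author's own statement) =====
-- stated objective: alternative
-- what changed: B replaces A's in-place prefix-sum mutation of increase's rows plus an iterative (left,right,res)-accumulator while-loop binary search by an immutable scan building cumulative triples and a recursive binary search returning through its call chain; same probe sequence, so the return value is identical even on non-monotone (negative-increment) data, but B does not mutate increase.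
import Mathlib
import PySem

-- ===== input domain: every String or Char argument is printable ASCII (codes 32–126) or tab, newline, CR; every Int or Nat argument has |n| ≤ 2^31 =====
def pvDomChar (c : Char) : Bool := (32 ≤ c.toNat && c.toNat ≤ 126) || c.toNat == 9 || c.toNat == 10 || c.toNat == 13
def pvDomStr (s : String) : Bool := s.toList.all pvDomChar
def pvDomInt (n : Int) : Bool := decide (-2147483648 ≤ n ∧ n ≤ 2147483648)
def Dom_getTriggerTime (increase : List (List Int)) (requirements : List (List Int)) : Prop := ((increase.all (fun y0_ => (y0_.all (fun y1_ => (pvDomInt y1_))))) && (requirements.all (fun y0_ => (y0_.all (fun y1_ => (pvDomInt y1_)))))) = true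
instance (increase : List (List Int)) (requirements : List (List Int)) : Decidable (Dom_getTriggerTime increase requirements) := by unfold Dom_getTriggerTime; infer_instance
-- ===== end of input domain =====

-- B replaces A's imperative in-place prefix accumulation + while-loop binary search by an
-- immutable scan building cumulative triples + a recursive binary search (same return value;
-- A mutates increase's inner lists in place, B does not — the claim is about the return value).

-- ===== PORT A =====
-- the inner 'for j in range(3): increase[i+1][j] += increase[i][j]' (set/getD are exact here:
-- Pre_ guarantees the indices 0,1,2 are in range, where Python would otherwise raise IndexError)
def pvUpdRow (prev row : List Int) : List Int :=
  [0, 1, 2].foldl (fun rw j => rw.set j (rw.getD j 0 + prev.getD j 0)) row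

-- the outer accumulation loop 'for i in range(len(increase) - 1)', structurally: the fully
-- updated previous row is carried as 'prev', each remaining row is updated in order
def pvAcc (prev : List Int) : List (List Int) → List (List Int)
  | [] => []
  | r :: rs => pvUpdRow prev r :: pvAcc (pvUpdRow prev r) rs

-- the three-way 'and' condition of A's while-loop body
def pvCondA (arr : List (List Int)) (req : List Int) (mid : Int) : Bool :=
  decide (PySem.List.pyGetD (PySem.List.pyGetD arr mid ([] : List Int)) 0 0 ≥ PySem.List.pyGetD req 0 0
    ∧ PySem.List.pyGetD (PySem.List.pyGetD arr mid ([] : List Int)) 1 0 ≥ PySem.List.pyGetD req 1 0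
    ∧ PySem.List.pyGetD (PySem.List.pyGetD arr mid ([] : List Int)) 2 0 ≥ PySem.List.pyGetD req 2 0)

-- A's 'while left <= right' loop; state (left, right, res[i])
def pvSearchA (arr : List (List Int)) (req : List Int) (left right res : Int) : Int :=
  if h : left ≤ right then
    let mid := PySem.Int.floordiv (left + right) 2
    if pvCondA arr req mid then
      pvSearchA arr req left (mid - 1) mid
    else
      pvSearchA arr req (mid + 1) right res
  else res
termination_by (right + 1 - left).toNat
decreasing_by
  · have := PySem.Int.floordiv_two_mid_bounds h; omega
  · have := PySem.Int.floordiv_two_mid_bounds h; omega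

def getTriggerTime (increase : List (List Int)) (requirements : List (List Int)) : List Int :=
  let n := requirements.length
  let res := List.replicate n (-1 : Int)
  let arr := ([0, 0, 0] : List Int) :: pvAcc [0, 0, 0] increase
  (PySem.List.pyRange 0 (n : Int) 1).foldl
    (fun r i => r.set i.toNat
      (pvSearchA arr (PySem.List.pyGetD requirements i ([] : List Int)) 0 ((arr.length : Int) - 1) (-1)))
    res

-- ===== PORT B =====
-- 'days.append((a+row[0], b+row[1], c+row[2]))' (getD exact under Pre_: rows have length ≥ 3)
def pvDays (last : Int × Int × Int) : List (List Int) → List (Int × Int × Int)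
  | [] => []
  | r :: rs =>
    (last.1 + r.getD 0 0, last.2.1 + r.getD 1 0, last.2.2 + r.getD 2 0)
      :: pvDays (last.1 + r.getD 0 0, last.2.1 + r.getD 1 0, last.2.2 + r.getD 2 0) rs

def pvCondB (days : List (Int × Int × Int)) (req : List Int) (m : Int) : Bool :=
  decide ((PySem.List.pyGetD days m ((0, 0, 0) : Int × Int × Int)).1 ≥ PySem.List.pyGetD req 0 0
    ∧ (PySem.List.pyGetD days m ((0, 0, 0) : Int × Int × Int)).2.1 ≥ PySem.List.pyGetD req 1 0
    ∧ (PySem.List.pyGetD days m ((0, 0, 0) : Int × Int × Int)).2.2 ≥ PySem.List.pyGetD req 2 0)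

-- B's recursive 'search(l, r, req)'
def pvSearchB (days : List (Int × Int × Int)) (req : List Int) (l r : Int) : Int :=
  if h : l > r then -1
  else
    let m := PySem.Int.floordiv (l + r) 2
    if pvCondB days req m then
      let s := pvSearchB days req l (m - 1)
      if s = -1 then m else s
    else pvSearchB days req (m + 1) r
termination_by (r + 1 - l).toNat
decreasing_by
  · have := PySem.Int.floordiv_two_mid_bounds (by omega : l ≤ r); omega
  · have := PySem.Int.floordiv_two_mid_bounds (by omega : l ≤ r); omega

def getTriggerTime_alt (increase : List (List Int)) (requirements : List (List Int)) : List Int :=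
  let days := ((0, 0, 0) : Int × Int × Int) :: pvDays (0, 0, 0) increase
  requirements.map (fun req => pvSearchB days req 0 ((days.length : Int) - 1))

-- ===== PRECONDITION & SPEC =====
-- exactly the inputs where the Python A returns: every accessed row needs indices 0..2
-- (a shorter row raises IndexError in A — and in B)
def Pre_getTriggerTime (increase : List (List Int)) (requirements : List (List Int)) : Prop :=
  (∀ r ∈ increase, 3 ≤ r.length) ∧ (∀ r ∈ requirements, 3 ≤ r.length)
instance (increase : List (List Int)) (requirements : List (List Int)) : Decidable (Pre_getTriggerTime increase requirements) := by unfold Pre_getTriggerTime; infer_instance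

def pvWitness_getTriggerTime : List (List Int) × List (List Int) :=
  ([[2, 8, 4], [2, 1, 1], [1, 2, 1]], [[2, 11, 3], [15, 10, 7], [1, 0, 0]])

def Spec_getTriggerTime (increase : List (List Int)) (requirements : List (List Int)) (out : List Int) : Prop := out = getTriggerTime_alt increase requirements
instance (increase : List (List Int)) (requirements : List (List Int)) (out : List Int) : Decidable (Spec_getTriggerTime increase requirements out) := by unfold Spec_getTriggerTime; infer_instance

-- ===== CLAIM (what is proved, stated in full; the proofs are below) =====
def Claim_equal_getTriggerTime : Prop := ∀ (increase : List (List Int)) (requirements : List (List Int)), Dom_getTriggerTime increase requirements → Pre_getTriggerTime increase requirements → Spec_getTriggerTime increase requirements (getTriggerTime increase requirements)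

-- ===== LEMMAS AND PROOFS =====

-- first three entries of a row, as a triple
def pvTriple (l : List Int) : Int × Int × Int := (l.getD 0 0, l.getD 1 0, l.getD 2 0)

theorem pvUpdRow_triple (prev row : List Int) (h3 : 3 ≤ row.length) :
    pvTriple (pvUpdRow prev row) =
      (prev.getD 0 0 + row.getD 0 0, prev.getD 1 0 + row.getD 1 0, prev.getD 2 0 + row.getD 2 0) := by
  match row, h3 with
  | a :: b :: c :: rest, _ => simp [pvUpdRow, pvTriple, List.foldl, Int.add_comm]

theorem pvAcc_map_triple (rows : List (List Int)) :
    ∀ prev, (∀ r ∈ rows, 3 ≤ r.length) →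
      (pvAcc prev rows).map pvTriple = pvDays (pvTriple prev) rows := by
  induction rows with
  | nil => intro prev _; rfl
  | cons r rs ih =>
    intro prev h
    have h3 : 3 ≤ r.length := h r (by simp)
    have ht := pvUpdRow_triple prev r h3
    have ih' := ih (pvUpdRow prev r) (fun x hx => h x (by simp [hx]))
    simp only [pvAcc, pvDays, List.map_cons, ih', pvTriple]
    rw [show ((pvUpdRow prev r).getD 0 0, (pvUpdRow prev r).getD 1 0, (pvUpdRow prev r).getD 2 0)
          = pvTriple (pvUpdRow prev r) from rfl, ht]

theorem pvCond_eq (arr : List (List Int)) (days : List (Int × Int × Int)) (req : List Int)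
    (hmap : arr.map pvTriple = days) (m : Int) :
    pvCondA arr req m = pvCondB days req m := by
  subst hmap
  have h0 : pvTriple ([] : List Int) = ((0, 0, 0) : Int × Int × Int) := rfl
  rw [pvCondA, pvCondB, ← h0, PySem.List.pyGetD_map pvTriple arr m []]
  simp [pvTriple, PySem.List.pyGetD_ofNat']

-- B's search never returns a value in (-∞, l) other than -1
theorem pvSearchB_lb (days : List (Int × Int × Int)) (req : List Int) :
    ∀ (k : Nat) (l r : Int), (r + 1 - l).toNat = k →
      pvSearchB days req l r = -1 ∨ l ≤ pvSearchB days req l r := by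
  intro k
  induction k using Nat.strong_induction_on with
  | _ k ih =>
  intro l r hk
  rw [pvSearchB]
  dsimp only
  split
  · exact Or.inl rfl
  · rename_i hlr
    have hb := PySem.Int.floordiv_two_mid_bounds (show l ≤ r by omega)
    set m := PySem.Int.floordiv (l + r) 2 with hm
    split
    · rcases ih ((m - 1) + 1 - l).toNat (by omega) l (m - 1) rfl with h1 | h1
      · simp [h1]; omega
      · split
        · omega
        · exact Or.inr h1
    · rcases ih (r + 1 - (m + 1)).toNat (by omega) (m + 1) r rfl with h1 | h1
      · exact Or.inl h1
      · exact Or.inr (by omega)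

-- the while-loop with result accumulator equals the recursive search
theorem pvSearch_eq (arr : List (List Int)) (days : List (Int × Int × Int)) (req : List Int)
    (hmap : arr.map pvTriple = days) :
    ∀ (k : Nat) (l r res : Int), (r + 1 - l).toNat = k → 0 ≤ l →
      pvSearchA arr req l r res =
        (if pvSearchB days req l r = -1 then res else pvSearchB days req l r) := by
  intro k
  induction k using Nat.strong_induction_on with
  | _ k ih =>
  intro l r res hk hl
  rw [pvSearchA, pvSearchB]
  dsimp only
  split
  · rename_i hlr
    have hb := PySem.Int.floordiv_two_mid_bounds hlr
    set m := PySem.Int.floordiv (l + r) 2 with hm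
    rw [pvCond_eq arr days req hmap m, dif_neg (show ¬ l > r by omega)]
    split
    · -- condition holds: A recurses left with res := m
      rw [ih ((m - 1) + 1 - l).toNat (by omega) l (m - 1) m rfl hl]
      by_cases hs : pvSearchB days req l (m - 1) = -1
      · simp [hs, show m ≠ -1 by omega]
      · simp [hs]
    · -- condition fails: both recurse right
      rw [ih (r + 1 - (m + 1)).toNat (by omega) (m + 1) r res rfl (by omega)]
  · rename_i hlr
    rw [dif_pos (show l > r by omega)]
    simp

-- the outer 'for i in range(n): res[i] = …' fold over a replicate(-1) list is a map
theorem pvFoldSet (g : Int → Int) :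
    ∀ (k : Nat) (i n : Nat) (res : List Int), n - i = k → i ≤ n → res.length = n →
      (PySem.List.pyRange (i : Int) (n : Int) 1).foldl (fun r j => r.set j.toNat (g j)) res
        = res.take i ++ (List.range (n - i)).map (fun d => g (((i + d : Nat) : Int))) := by
  intro k
  induction k with
  | zero =>
    intro i n res hk hin hres
    have hni : i = n := by omega
    subst hni
    rw [PySem.List.pyRange_one_eq_nil (by omega)]
    simp [List.take_of_length_le (by omega : res.length ≤ i)]
  | succ k ih =>
    intro i n res hk hin hres
    have hlt : i < n := by omega
    rw [PySem.List.pyRange_one_cons (by exact_mod_cast hlt)]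
    simp only [List.foldl_cons, Int.toNat_natCast]
    have hcast : (i : Int) + 1 = ((i + 1 : Nat) : Int) := by push_cast; ring
    rw [hcast, ih (i + 1) n (res.set i (g i)) (by omega) (by omega) (by simp [hres])]
    have hi : i < res.length := by omega
    have htake : (res.set i (g i)).take (i + 1) = res.take i ++ [g i] := by
      rw [List.set_eq_take_cons_drop _ hi, List.take_append]
      simp [List.length_take, Nat.min_eq_left (le_of_lt hi)]
    rw [htake]
    have hrange : List.range (n - i) = 0 :: (List.range (n - i - 1)).map Nat.succ := by
      have : n - i = (n - i - 1) + 1 := by omega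
      rw [this, List.range_succ_eq_map]
      simp
    rw [hrange]
    simp only [List.map_cons, List.map_map, List.append_assoc, List.cons_append,
      List.nil_append, Nat.add_zero]
    congr 2
    apply List.map_congr_left
    intro d _
    simp only [Function.comp]
    congr 2
    omega

theorem pvMapRange_getD (f : List Int → Int) (reqs : List (List Int)) :
    (List.range reqs.length).map (fun d => f (reqs.getD d [])) = reqs.map f := by
  induction reqs with
  | nil => rfl
  | cons r rs ih =>
    rw [List.length_cons, List.range_succ_eq_map, List.map_cons, List.map_map, List.map_cons]
    refine congrArg₂ _ rfl ?_
    rw [← ih]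
    apply List.map_congr_left
    intro d _
    rfl

-- ===== VERDICT (by name: the statement is the Claim_ definition above) =====
theorem getTriggerTime_spec : Claim_equal_getTriggerTime := by
  intro increase requirements _ hpre
  unfold Spec_getTriggerTime getTriggerTime getTriggerTime_alt
  have hmap : (([0, 0, 0] : List Int) :: pvAcc [0, 0, 0] increase).map pvTriple
      = ((0, 0, 0) : Int × Int × Int) :: pvDays (0, 0, 0) increase := by
    rw [List.map_cons, pvAcc_map_triple increase [0, 0, 0] hpre.1]
    rfl
  have hlen : (([0, 0, 0] : List Int) :: pvAcc [0, 0, 0] increase).length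
      = (((0, 0, 0) : Int × Int × Int) :: pvDays (0, 0, 0) increase).length := by
    rw [← hmap, List.length_map]
  dsimp only
  have hfold := pvFoldSet (fun j => pvSearchA (([0, 0, 0] : List Int) :: pvAcc [0, 0, 0] increase)
      (PySem.List.pyGetD requirements j []) 0
      (((([0, 0, 0] : List Int) :: pvAcc [0, 0, 0] increase).length : Int) - 1) (-1))
    requirements.length 0 requirements.length (List.replicate requirements.length (-1))
    (by omega) (by omega) (by simp)
  simp only [Nat.cast_zero, List.take_zero, List.nil_append, Nat.sub_zero, Nat.zero_add] at hfold
  rw [hfold]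
  rw [← pvMapRange_getD (fun req => pvSearchB (((0, 0, 0) : Int × Int × Int) :: pvDays (0, 0, 0) increase) req 0
    (((((0, 0, 0) : Int × Int × Int) :: pvDays (0, 0, 0) increase).length : Int) - 1)) requirements]
  apply List.map_congr_left
  intro d _
  rw [PySem.List.pyGetD_natCast]
  rw [pvSearch_eq _ _ _ hmap ((((([0, 0, 0] : List Int) :: pvAcc [0, 0, 0] increase).length : Int) - 1) + 1 - 0).toNat
    0 _ (-1) rfl (by omega)]
  rw [hlen]
  rcases pvSearchB_lb (((0, 0, 0) : Int × Int × Int) :: pvDays (0, 0, 0) increase)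
    (requirements.getD d []) _ 0 ((((((0, 0, 0) : Int × Int × Int) :: pvDays (0, 0, 0) increase).length : Int) - 1)) rfl with h | h
  · rw [if_pos h, h]
  · split
    · rename_i hs; omega
    · rfl
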